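-- pv_equiv track=rewrite | github.com/MathEngElectrical/Machine_Learning_Supervised | Tests/test1.py | func_calculate_array_in_volterra
-- ===== SOURCE A (Python) =====
-- def func_calculate_array_in_volterra(list_in, P, M):
--     """
--     Função que ajusta os valores de entrada para o calculo da modelagem por volterra.
--     Args:
--         list_in -> Valores de entrada que devem ser ajustados. (List)
--         P -> Grau do polinômio modelador. (Int)
--         M -> Memória do sistema que configura quantas entradas passadas a atual depende. (Int)
--     Returns:
--         list_in_volterra -> Lista com os valores de entrada ajustados. (List)
--     """
--     list_in_volterra = []
--     for in_index in range(len(list_in)):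
--         list_in_memo = []
--         for p in range(1, P + 1):
--             for m in range(0, M + 1):
--                 if in_index - m < 0:
--                     in_volterra = 0
--                 else:
--                     in_volterra = list_in[in_index - m][0]
--                 list_in_memo.append(in_volterra ** p)
--         list_in_volterra.append(list_in_memo)
--     return list_in_volterra
-- ===== SOURCE B (Python) =====
-- def func_calculate_array_in_volterra(list_in, P, M):
--     """Column-wise construction + transpose: build each feature column (a full
--     zero-padded shifted power time-series over all indices) once, then
--     transpose the column list into per-index rows, instead of computing each
--     row's cells one by one."""
--     n = len(list_in)
--     base = [row[0] for row in list_in]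
--     cols = [[0] * min(m, n) + [v ** p for v in base[:n - min(m, n)]]
--             for p in range(1, P + 1) for m in range(M + 1)]
--     return [[col[i] for col in cols] for i in range(n)]
-- ===== Notes on version B (the rewrite author's own statement) =====
-- stated objective: alternative
-- what changed: B builds each Volterra feature column once as a complete zero-padded shifted power time-series over the whole input, then transposes the column list into per-index rows, instead of A's triple loop that computes every cell of every row independently with a negative-offset branch.
-- outside the precondition, e.g. on func_calculate_array_in_volterra([[]], 0, 0): A returns [[]], B raises IndexError
import Mathlib
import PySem

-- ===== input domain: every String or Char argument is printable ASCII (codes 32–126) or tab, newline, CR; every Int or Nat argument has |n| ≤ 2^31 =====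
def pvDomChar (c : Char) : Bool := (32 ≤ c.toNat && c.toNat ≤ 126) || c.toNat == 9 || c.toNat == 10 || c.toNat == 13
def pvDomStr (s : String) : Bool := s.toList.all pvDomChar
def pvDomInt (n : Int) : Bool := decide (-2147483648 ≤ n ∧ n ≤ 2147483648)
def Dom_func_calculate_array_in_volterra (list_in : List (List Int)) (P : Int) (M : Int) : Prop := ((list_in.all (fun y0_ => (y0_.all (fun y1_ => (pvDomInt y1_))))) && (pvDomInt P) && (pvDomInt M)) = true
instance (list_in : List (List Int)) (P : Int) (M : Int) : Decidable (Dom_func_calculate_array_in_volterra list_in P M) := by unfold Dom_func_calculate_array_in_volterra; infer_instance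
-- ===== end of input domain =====

-- B builds each feature column once as a zero-padded shifted power series and transposes,
-- instead of A's per-cell triple loop (alternative decomposition, same asymptotic cost).


-- ===== PORT A =====
def func_calculate_array_in_volterra (list_in : List (List Int)) (P : Int) (M : Int) : List (List Int) :=
  (PySem.List.pyRange 0 (list_in.length : Int) 1).foldl (fun list_in_volterra in_index =>
    list_in_volterra ++ [
      (PySem.List.pyRange 1 (P + 1) 1).foldl (fun list_in_memo p =>
        (PySem.List.pyRange 0 (M + 1) 1).foldl (fun list_in_memo m =>
          let in_volterra : Int :=
            if in_index - m < 0 then 0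
            else PySem.List.pyGetD (PySem.List.pyGetD list_in (in_index - m) []) 0 0
          list_in_memo ++ [in_volterra ^ p.toNat]) list_in_memo) []
    ]) []

-- ===== PORT B =====
def func_calculate_array_in_volterra_alt (list_in : List (List Int)) (P : Int) (M : Int) : List (List Int) :=
  let n := list_in.length
  let base := list_in.map (fun row => PySem.List.pyGetD row 0 0)
  let cols := (PySem.List.pyRange 1 (P + 1) 1).flatMap (fun p =>
    (PySem.List.pyRange 0 (M + 1) 1).map (fun m =>
      List.replicate (min m (n : Int)).toNat 0
        ++ (PySem.List.slice base none (some ((n : Int) - min m (n : Int)))).map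
            (fun v => v ^ p.toNat)))
  (PySem.List.pyRange 0 (n : Int) 1).map (fun i =>
    cols.map (fun col => PySem.List.pyGetD col i 0))

-- ===== PRECONDITION & SPEC =====
-- Pre_ excludes inputs containing an empty inner row: on every such input B raises IndexError
-- (it reads row[0] unconditionally), and A itself raises whenever P ≥ 1 and M ≥ 0.
def Pre_func_calculate_array_in_volterra (list_in : List (List Int)) (P : Int) (M : Int) : Prop :=
  ∀ row ∈ list_in, row ≠ []
instance (list_in : List (List Int)) (P : Int) (M : Int) : Decidable (Pre_func_calculate_array_in_volterra list_in P M) := by unfold Pre_func_calculate_array_in_volterra; infer_instance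
def pvWitness_func_calculate_array_in_volterra : List (List Int) × Int × Int := ([[1], [2], [3]], 2, 1)

def Spec_func_calculate_array_in_volterra (list_in : List (List Int)) (P : Int) (M : Int) (out : List (List Int)) : Prop := out = func_calculate_array_in_volterra_alt list_in P M
instance (list_in : List (List Int)) (P : Int) (M : Int) (out : List (List Int)) : Decidable (Spec_func_calculate_array_in_volterra list_in P M out) := by unfold Spec_func_calculate_array_in_volterra; infer_instance

-- ===== CLAIM (what is proved, stated in full; the proofs are below) =====
def Claim_equal_func_calculate_array_in_volterra : Prop := ∀ (list_in : List (List Int)) (P : Int) (M : Int), Dom_func_calculate_array_in_volterra list_in P M → Pre_func_calculate_array_in_volterra list_in P M → Spec_func_calculate_array_in_volterra list_in P M (func_calculate_array_in_volterra list_in P M)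

-- ===== LEMMAS AND PROOFS =====

-- value A computes for cell (i, m): 0 for negative offsets, else list_in[i-m][0]
def pvVal (list_in : List (List Int)) (i m : Int) : Int :=
  if i - m < 0 then 0 else PySem.List.pyGetD (PySem.List.pyGetD list_in (i - m) []) 0 0

-- the feature row both programs emit for index i
def pvMemo (list_in : List (List Int)) (P M : Int) (i : Int) : List Int :=
  (PySem.List.pyRange 1 (P + 1) 1).flatMap (fun p =>
    (PySem.List.pyRange 0 (M + 1) 1).map (fun m => (pvVal list_in i m) ^ p.toNat))

lemma A_eq_map (list_in : List (List Int)) (P M : Int) :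
    func_calculate_array_in_volterra list_in P M
      = (PySem.List.pyRange 0 (list_in.length : Int) 1).map (pvMemo list_in P M) := by
  unfold func_calculate_array_in_volterra pvMemo pvVal
  simp only [PySem.List.foldl_append_singleton_eq_map, PySem.List.foldl_append_eq_flatMap]
  simp

-- B's column entry at a valid index i equals A's cell value raised to the power p
lemma col_entry (list_in : List (List Int)) (p m i : Int)
    (hp : 1 ≤ p) (hm : 0 ≤ m) (hi : 0 ≤ i) (hin : i < (list_in.length : Int)) :
    PySem.List.pyGetD
      (List.replicate (min m (list_in.length : Int)).toNat (0 : Int)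
        ++ (PySem.List.slice (list_in.map (fun row => PySem.List.pyGetD row 0 0)) none
              (some ((list_in.length : Int) - min m (list_in.length : Int)))).map
            (fun v => v ^ p.toNat))
      i 0
      = (pvVal list_in i m) ^ p.toNat := by
  set n := list_in.length with hn
  set k := min m (n : Int) with hk
  have hk0 : 0 ≤ k := by omega
  have hkn : k ≤ (n : Int) := by omega
  rw [PySem.List.slice_to _ (by omega)]
  have htk : (((n : Int) - k).toNat) = n - k.toNat := by omega
  have hlen : (List.replicate k.toNat (0 : Int)
      ++ ((list_in.map (fun row => PySem.List.pyGetD row 0 0)).take ((n : Int) - k).toNat).map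
          (fun v => v ^ p.toNat)).length = n := by
    simp [htk]; omega
  have hiL : i < ((List.replicate k.toNat (0 : Int)
      ++ ((list_in.map (fun row => PySem.List.pyGetD row 0 0)).take ((n : Int) - k).toNat).map
          (fun v => v ^ p.toNat)).length : Int) := by
    rw [hlen]; exact hin
  rw [PySem.List.pyGetD_eq_getElem _ _ hi hiL]
  by_cases hz : i.toNat < k.toNat
  · rw [List.getElem_append_left (by simpa using hz)]
    simp only [List.getElem_replicate]
    unfold pvVal
    rw [if_pos (by omega)]
    have hpt : p.toNat ≠ 0 := by omega
    rw [zero_pow hpt]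
  · have hge : k.toNat ≤ i.toNat := by omega
    rw [List.getElem_append_right (by simpa using hge)]
    simp only [List.length_replicate, List.getElem_map, List.getElem_take]
    unfold pvVal
    have hkm : k = m := by omega
    have hnn : ¬ (i - m < 0) := by omega
    rw [if_neg hnn]
    have h0 : (0:Int) ≤ i - m := by omega
    have h1 : i - m < (list_in.length : Int) := by omega
    rw [PySem.List.pyGetD_eq_getElem list_in [] h0 h1]
    have he : list_in[i.toNat - k.toNat]'(by omega) = list_in[(i - m).toNat]'(by omega) := by
      congr 1
      omega
    rw [he]

-- ===== VERDICT (by name: the statement is the Claim_ definition above) =====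
theorem func_calculate_array_in_volterra_spec : Claim_equal_func_calculate_array_in_volterra := by
  intro list_in P M _hD _hP
  unfold Spec_func_calculate_array_in_volterra
  rw [A_eq_map]
  unfold func_calculate_array_in_volterra_alt
  simp only []
  apply List.map_congr_left
  intro i hi
  rw [PySem.List.mem_pyRange_one] at hi
  rw [List.map_flatMap]
  unfold pvMemo
  refine List.flatMap_congr ?_
  intro p hp
  rw [PySem.List.mem_pyRange_one] at hp
  rw [List.map_map]
  apply List.map_congr_left
  intro m hm
  rw [PySem.List.mem_pyRange_one] at hm
  simpa using (col_entry list_in p m i hp.1 hm.1 hi.1 hi.2).symm
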